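-- pv_equiv track=rewrite | github.com/anptitd22/PYTHON-PTIT | CodePTIT/PY01027 - SỐ LỘC PHÁT ĐẸP.py | check
-- ===== SOURCE A (Python) =====
-- def check(n):
--     if n.count("888")>0:
--         return "NO"
--     else:
--        for i in n:
--            if i!='6' and i !='8':
--                return"NO"
--     return "YES"
-- ===== SOURCE B (Python) =====
-- def check(n):
--     run = 0
--     for c in n:
--         if c != '6' and c != '8':
--             return "NO"
--         if c == '8':
--             run += 1
--             if run == 3:
--                 return "NO"
--         else:
--             run = 0
--     return "YES"
-- ===== Notes on version B (the rewrite author's own statement) =====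
-- stated objective: alternative
-- what changed: Replaced A's substring-count scan plus separate validity loop with one left-to-right pass maintaining a run counter of consecutive eights (reject other chars, reject when the run reaches three, reset on a six).
import Mathlib
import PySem

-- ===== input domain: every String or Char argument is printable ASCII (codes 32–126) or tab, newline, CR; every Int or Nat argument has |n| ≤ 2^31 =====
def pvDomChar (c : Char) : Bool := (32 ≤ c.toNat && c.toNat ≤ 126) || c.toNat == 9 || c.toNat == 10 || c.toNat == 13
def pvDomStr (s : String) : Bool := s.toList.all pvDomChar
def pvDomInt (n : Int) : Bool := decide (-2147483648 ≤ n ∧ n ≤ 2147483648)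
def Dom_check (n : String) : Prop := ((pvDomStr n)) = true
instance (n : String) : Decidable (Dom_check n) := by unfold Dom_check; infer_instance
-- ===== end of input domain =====

-- B replaces A's two passes (a '888'-substring count plus a validity loop) with one pass
-- keeping a run counter of consecutive '8's; equivalence is proved on all inputs.

-- ===== PORT A =====
-- the 'for i in n' validity loop of A, returning at the first char that is neither '6' nor '8'
def checkLoopA : List Char → String
  | [] => "YES"
  | c :: t => if c ≠ '6' ∧ c ≠ '8' then "NO" else checkLoopA t

def check (n : String) : String :=
  if PySem.Str.count n "888" > 0 then "NO" else checkLoopA n.toList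

-- ===== PORT B =====
-- B's single loop: run = count of consecutive trailing '8's seen so far
def checkLoopB : List Char → Nat → String
  | [], _ => "YES"
  | c :: t, run =>
      if c ≠ '6' ∧ c ≠ '8' then "NO"
      else if c = '8' then
        (if run + 1 = 3 then "NO" else checkLoopB t (run + 1))
      else checkLoopB t 0

def check_alt (n : String) : String := checkLoopB n.toList 0

-- ===== PRECONDITION & SPEC =====
def Spec_check (n : String) (out : String) : Prop := out = check_alt n
instance (n : String) (out : String) : Decidable (Spec_check n out) := by unfold Spec_check; infer_instance

-- ===== CLAIM (what is proved, stated in full; the proofs are below) =====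
def Claim_equal_check : Prop := ∀ (n : String), Dom_check n → Spec_check n (check n)

-- ===== LEMMAS AND PROOFS =====

def goodChar (c : Char) : Bool := c = '6' || c = '8'

-- go never decreases the accumulator
theorem count_go_ge (sub : List Char) (fuel : Nat) (l : List Char) (acc : Nat) :
    acc ≤ PySem.Chars.count.go sub fuel l acc := by
  induction fuel generalizing l acc with
  | zero => simp [PySem.Chars.count.go]
  | succ f ih =>
    cases l with
    | nil => simp [PySem.Chars.count.go]
    | cons h t =>
      rw [PySem.Chars.count.go]
      split
      · exact le_trans (Nat.le_succ acc) (ih _ _)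
      · exact ih _ _

theorem count_go_eq_iff (sub : List Char) (hsub : sub ≠ []) (fuel : Nat) (l : List Char)
    (hf : l.length ≤ fuel) (acc : Nat) :
    PySem.Chars.count.go sub fuel l acc = acc ↔ ¬ sub <:+: l := by
  induction fuel generalizing l acc with
  | zero =>
    have hl : l = [] := by
      cases l with
      | nil => rfl
      | cons h t => simp at hf
    subst hl
    simp [PySem.Chars.count.go, List.infix_nil, hsub]
  | succ f ih =>
    cases l with
    | nil =>
      simp [PySem.Chars.count.go, List.infix_nil, hsub]
    | cons h t =>
      rw [PySem.Chars.count.go]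
      split
      · rename_i hpre
        have hp : sub <+: h :: t := List.isPrefixOf_iff_prefix.mp hpre
        constructor
        · intro heq
          exfalso
          have := count_go_ge sub f (List.drop sub.length (h :: t)) (acc + 1)
          omega
        · intro hni
          exact absurd hp.isInfix hni
      · rename_i hpre
        have hnp : ¬ sub <+: h :: t := fun hp => hpre (List.isPrefixOf_iff_prefix.mpr hp)
        have ht : t.length ≤ f := by simpa using hf
        rw [ih t ht acc, List.infix_cons_iff]
        tauto

theorem count_pos_iff (s sub : List Char) (hsub : sub ≠ []) :
    0 < PySem.Chars.count s sub ↔ sub <:+: s := by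
  have : PySem.Chars.count s sub = PySem.Chars.count.go sub s.length s 0 := by
    simp [PySem.Chars.count, List.isEmpty_iff, hsub]
  rw [this]
  rw [Nat.pos_iff_ne_zero, ne_eq, count_go_eq_iff sub hsub s.length s (le_refl _) 0]
  tauto

theorem checkLoopA_eq (l : List Char) :
    checkLoopA l = if l.all goodChar then "YES" else "NO" := by
  induction l with
  | nil => simp [checkLoopA]
  | cons c t ih =>
    simp only [checkLoopA, List.all_cons]
    by_cases h6 : c = '6' <;> by_cases h8 : c = '8' <;>
      simp [h6, h8, goodChar, ih]

def okB : List Char → Nat → Bool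
  | [], _ => true
  | c :: t, run =>
      goodChar c &&
        (if c = '8' then (decide (run + 1 ≠ 3)) && okB t (run + 1) else okB t 0)

theorem checkLoopB_eq (l : List Char) (run : Nat) :
    checkLoopB l run = if okB l run then "YES" else "NO" := by
  induction l generalizing run with
  | nil => simp [checkLoopB, okB]
  | cons c t ih =>
    simp only [checkLoopB, okB]
    by_cases h6 : c = '6' <;> by_cases h8 : c = '8' <;>
      by_cases h3 : run + 1 = 3 <;>
        simp [h6, h8, h3, goodChar, ih]

-- characterisation of B's run-counter loop (run = number of '8's just before l, run ≤ 2)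
theorem okB_char_iff (l : List Char) (run : Nat) (hrun : run ≤ 2) :
    okB l run = (l.all goodChar && !(List.replicate (3 - run) '8' <+: l : Bool)
      && !(['8','8','8'] <:+: l : Bool)) := by
  induction l generalizing run with
  | nil =>
    have h1 : ¬ (List.replicate (3 - run) '8' <+: ([] : List Char)) := by
      rw [List.prefix_nil]
      intro h
      have := congrArg List.length h
      simp at this
      omega
    simp [okB, h1]
  | cons c t ih =>
    by_cases hg : goodChar c
    case neg =>
      simp [okB, hg]
    case pos =>
      simp only [goodChar, Bool.or_eq_true, decide_eq_true_eq] at hg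
      cases hg with
      | inl h6 =>
        subst h6
        have h8 : ('6' : Char) ≠ '8' := by decide
        have hpre : ¬ (List.replicate (3 - run) '8' <+: '6' :: t) := by
          intro hp
          obtain ⟨k, hk⟩ : ∃ k, 3 - run = k + 1 := ⟨3 - run - 1, by omega⟩
          rw [hk, List.replicate_succ, List.cons_prefix_cons] at hp
          exact h8 hp.1.symm
        have hin : (['8','8','8'] <:+: '6' :: t) ↔ (['8','8','8'] <:+: t) := by
          rw [List.infix_cons_iff]
          constructor
          · rintro (hp | h)
            · rw [List.cons_prefix_cons] at hp; exact absurd hp.1.symm h8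
            · exact h
          · exact Or.inr
        have hkey : okB ('6' :: t) run = okB t 0 := by simp [okB, goodChar]
        rw [hkey, ih 0 (by omega)]
        have hrepl : List.replicate (3 - 0) '8' = ['8','8','8'] := by decide
        rw [hrepl]
        have e1 : ('6' :: t).all goodChar = t.all goodChar := by simp [goodChar]
        rw [e1]
        have e2 : decide (List.replicate (3 - run) '8' <+: '6' :: t) = false := by
          simp [hpre]
        rw [e2]
        have e3 : decide (['8','8','8'] <:+: '6' :: t) = decide (['8','8','8'] <:+: t) :=
          decide_eq_decide.mpr hin
        rw [e3]
        by_cases hi : (['8','8','8'] <:+: t)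
        · simp [hi]
        · have hp : ¬ (['8','8','8'] <+: t) := fun h => hi h.isInfix
          simp [hi, hp]
      | inr h8 =>
        subst h8
        have hcons : (List.replicate (3 - run) '8' <+: '8' :: t) ↔
            (List.replicate (3 - (run + 1)) '8' <+: t) := by
          obtain ⟨k, hk⟩ : ∃ k, 3 - run = k + 1 := ⟨3 - run - 1, by omega⟩
          rw [hk, List.replicate_succ, List.cons_prefix_cons]
          have : 3 - (run + 1) = k := by omega
          rw [this]
          simp
        by_cases h3 : run + 1 = 3
        case pos =>
          have hr2 : run = 2 := by omega
          subst hr2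
          have hp : List.replicate (3 - 2) '8' <+: '8' :: t := by
            simp [List.replicate]
          simp [okB, goodChar, h3]
        case neg =>
          have hrun1 : run + 1 ≤ 2 := by omega
          have hkey : okB ('8' :: t) run = okB t (run + 1) := by
            simp [okB, goodChar, h3]
          rw [hkey, ih (run + 1) hrun1]
          have e1 : ('8' :: t).all goodChar = t.all goodChar := by simp [goodChar]
          rw [e1]
          have e2 : decide (List.replicate (3 - run) '8' <+: '8' :: t)
              = decide (List.replicate (3 - (run + 1)) '8' <+: t) :=
            decide_eq_decide.mpr hcons
          rw [e2]
          have hin : (['8','8','8'] <:+: '8' :: t) ↔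
              (['8','8'] <+: t) ∨ (['8','8','8'] <:+: t) := by
            rw [List.infix_cons_iff, List.cons_prefix_cons]
            simp
          by_cases hpr : (List.replicate (3 - (run + 1)) '8' <+: t)
          · have h23 : 3 - (run + 1) = 2 - run := by omega
            rw [h23] at hpr
            simp [hpr]
          · by_cases hi : (['8','8','8'] <:+: t)
            · have hil : ['8','8','8'] <:+: '8' :: t := hin.mpr (Or.inr hi)
              simp [hi, hil]
            · have hni : ¬ (['8','8','8'] <:+: '8' :: t) := by
                rw [hin]
                rintro (hp | h)
                · apply hpr
                  have hle1 : run ≤ 1 := by omega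
                  interval_cases run
                  · have : List.replicate (3 - (0 + 1)) '8' = ['8','8'] := by decide
                    rw [this]; exact hp
                  · have : List.replicate (3 - (1 + 1)) '8' = ['8'] := by decide
                    rw [this]
                    exact List.IsPrefix.trans ⟨['8'], rfl⟩ hp
                · exact hi h
              simp [hi, hni]

-- ===== VERDICT (by name: the statement is the Claim_ definition above) =====
theorem check_spec : Claim_equal_check := by
  intro n _
  unfold Spec_check check check_alt
  rw [PySem.Str.count_eq, checkLoopB_eq, checkLoopA_eq]
  have h888 : ("888" : String).toList = ['8','8','8'] := by decide
  rw [h888]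
  rw [okB_char_iff n.toList 0 (by omega)]
  by_cases hi : (['8','8','8'] <:+: n.toList)
  · rw [if_pos ((count_pos_iff _ _ (by decide)).mpr hi)]
    simp [hi]
  · have hc : ¬ PySem.Chars.count n.toList ['8','8','8'] > 0 := by
      rw [gt_iff_lt, count_pos_iff _ _ (by decide)]
      exact hi
    rw [if_neg hc]
    have hpr : ¬ (['8','8','8'] <+: n.toList) := fun h => hi h.isInfix
    have hrepl : List.replicate (3 - 0) '8' = ['8','8','8'] := by decide
    rw [hrepl]
    simp [hi, hpr]
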